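-- pv_equiv track=rewrite | github.com/austinteshuba/satisfyingSubarrays | satisfyingSubarrays.py | subarrays
-- ===== SOURCE A (Python) =====
-- def subarrays(arr, k):
--     if arr == None or arr == []:
--         return 0
--     amountOfLists = 0
--     for i in range(len(arr)):
--         oddCount = 0
--         for j in range(i, len(arr)):
--             if arr[j] % 2 == 1:
--                 oddCount += 1
--             if oddCount > k:
--                 break
--             elif oddCount == k:
--                 amountOfLists += 1
--     return amountOfLists
-- ===== SOURCE B (Python) =====
-- def subarrays(arr, k):
--     if arr == None or arr == []:
--         return 0
--     counts = {0: 1}   # counts[c] = number of prefixes seen with odd-count c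
--     c = 0
--     ans = 0
--     for x in arr:
--         c += x % 2
--         ans += counts.get(c - k, 0)
--         counts[c] = counts.get(c, 0) + 1
--     return ans
-- ===== Notes on version B (the rewrite author's own statement) =====
-- stated objective: faster
-- what changed: Replaced the O(n^2) nested scan over all start indices by a single pass that counts prefix odd-counts in a hash map and adds counts.get(c-k, 0) at each position.
import Mathlib
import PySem

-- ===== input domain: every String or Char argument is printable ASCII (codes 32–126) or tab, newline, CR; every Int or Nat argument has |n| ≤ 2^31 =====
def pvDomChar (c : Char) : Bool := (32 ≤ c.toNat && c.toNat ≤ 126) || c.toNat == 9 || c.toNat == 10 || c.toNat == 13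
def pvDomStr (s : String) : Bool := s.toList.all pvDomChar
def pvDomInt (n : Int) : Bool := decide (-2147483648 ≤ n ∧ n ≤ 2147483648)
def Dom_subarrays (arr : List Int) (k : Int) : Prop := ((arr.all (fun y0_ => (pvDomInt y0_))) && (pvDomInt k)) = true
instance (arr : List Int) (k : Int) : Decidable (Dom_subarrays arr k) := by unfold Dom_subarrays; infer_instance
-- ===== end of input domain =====

-- B replaces A's nested scan over all start indices by a single pass that counts prefix odd-counts in a map (objective: faster).

-- ===== PORT A =====
-- inner 'for j in range(i, len(arr))' loop with its break, over the suffix arr[i:]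
def subAInner : List Int → Int → Int → Int → Int
  | [], _, _, acc => acc
  | x :: rest, k, oddCount, acc =>
      let oddCount := if PySem.Int.mod x 2 = 1 then oddCount + 1 else oddCount
      if oddCount > k then acc
      else if oddCount = k then subAInner rest k oddCount (acc + 1)
      else subAInner rest k oddCount acc

-- outer 'for i in range(len(arr))' loop: run the inner loop on each suffix
def subAOuter : List Int → Int → Int → Int
  | [], _, acc => acc
  | x :: rest, k, acc => subAOuter rest k (subAInner (x :: rest) k 0 acc)

def subarrays (arr : List Int) (k : Int) : Int :=
  if arr = [] then 0 else subAOuter arr k 0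

-- ===== PORT B =====
-- one pass: c = odd-count of the processed prefix, counts = how often each prefix odd-count occurred
def subBLoop : List Int → Int → Int → PySem.Dict Int Int → Int → Int
  | [], _, _, _, ans => ans
  | x :: rest, k, c, counts, ans =>
      let c := c + PySem.Int.mod x 2
      let ans := ans + counts.getD (c - k) 0
      let counts := counts.insert c (counts.getD c 0 + 1)
      subBLoop rest k c counts ans

def subarrays_alt (arr : List Int) (k : Int) : Int :=
  if arr = [] then 0 else subBLoop arr k 0 (PySem.Dict.insert PySem.Dict.empty 0 1) 0

-- ===== PRECONDITION & SPEC =====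
def Spec_subarrays (arr : List Int) (k : Int) (out : Int) : Prop := out = subarrays_alt arr k
instance (arr : List Int) (k : Int) (out : Int) : Decidable (Spec_subarrays arr k out) := by unfold Spec_subarrays; infer_instance

-- ===== CLAIM (what is proved, stated in full; the proofs are below) =====
def Claim_equal_subarrays : Prop := ∀ (arr : List Int) (k : Int), Dom_subarrays arr k → Spec_subarrays arr k (subarrays arr k)

-- ===== LEMMAS AND PROOFS =====

-- odd-count of a list, as an Int
def ocI (l : List Int) : Int := (l.countP (fun x => PySem.Int.mod x 2 == 1) : Int)

-- odd-count of the length-a prefix of arr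
def pfx (arr : List Int) (a : ℕ) : Int := ocI (arr.take a)

theorem ocI_nonneg (l : List Int) : 0 ≤ ocI l := by
  unfold ocI; positivity

theorem ocI_nil : ocI [] = 0 := by simp [ocI]

theorem ocI_cons (x : Int) (l : List Int) :
    ocI (x :: l) = (if PySem.Int.mod x 2 = 1 then (1:Int) else 0) + ocI l := by
  unfold ocI
  rw [List.countP_cons]
  by_cases h : PySem.Int.mod x 2 = 1 <;> simp <;> omega

theorem mod2_eq_ite (x : Int) :
    PySem.Int.mod x 2 = if PySem.Int.mod x 2 = 1 then (1:Int) else 0 := by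
  rw [PySem.Int.mod_eq_emod_of_pos (by norm_num)]
  rcases Int.emod_two_eq x with h | h <;> simp [h]

theorem ocI_singleton (x : Int) : ocI [x] = PySem.Int.mod x 2 := by
  conv_rhs => rw [mod2_eq_ite x]
  unfold ocI
  by_cases h : PySem.Int.mod x 2 = 1 <;> simp [List.countP_cons]

theorem pfx_zero (arr : List Int) : pfx arr 0 = 0 := by simp [pfx, ocI]

theorem pfx_succ (arr : List Int) (m : ℕ) (x : Int) (rest : List Int)
    (h : arr.drop m = x :: rest) :
    pfx arr (m + 1) = pfx arr m + PySem.Int.mod x 2 := by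
  have ht : arr.take (m + 1) = arr.take m ++ [x] := by
    rw [List.take_add, h]; rfl
  have hs := ocI_singleton x
  unfold pfx
  rw [ht]
  unfold ocI at hs ⊢
  rw [List.countP_append]
  omega

theorem pfx_split (arr : List Int) (a j : ℕ) :
    pfx arr (a + (j + 1)) = pfx arr a + ocI ((arr.drop a).take (j + 1)) := by
  simp [pfx, List.take_add, ocI, List.countP_append]

-- the three-way branch of the inner loop, expressed against the sum characterization
theorem branch_eq (rest : List Int) (k : Int) (c' acc : Int)
    (ih : ∀ (c acc : Int), subAInner rest k c acc
      = acc + ∑ j ∈ Finset.range rest.length,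
          (if c + ocI (rest.take (j + 1)) = k then (1:Int) else 0)) :
    (if c' > k then acc
     else if c' = k then subAInner rest k c' (acc + 1)
     else subAInner rest k c' acc)
    = acc + ((∑ j ∈ Finset.range rest.length,
        (if c' + ocI (rest.take (j + 1)) = k then (1:Int) else 0))
      + (if c' = k then (1:Int) else 0)) := by
  by_cases h1 : c' > k
  · rw [if_pos h1]
    have hS : (∑ j ∈ Finset.range rest.length,
        (if c' + ocI (rest.take (j + 1)) = k then (1:Int) else 0)) = 0 := by
      apply Finset.sum_eq_zero
      intro j _
      have := ocI_nonneg (rest.take (j + 1))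
      have hne : ¬ (c' + ocI (rest.take (j + 1)) = k) := by omega
      rw [if_neg hne]
    rw [hS, if_neg (by omega : ¬ (c' = k))]
    ring
  · rw [if_neg h1]
    by_cases h2 : c' = k
    · rw [if_pos h2, ih, if_pos h2]; ring
    · rw [if_neg h2, ih, if_neg h2]; ring

theorem inner_eq (l : List Int) (k : Int) : ∀ (c acc : Int),
    subAInner l k c acc
      = acc + ∑ j ∈ Finset.range l.length,
          (if c + ocI (l.take (j + 1)) = k then (1:Int) else 0) := by
  induction l with
  | nil => intro c acc; simp [subAInner]
  | cons x rest ih =>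
      intro c acc
      set m : Int := if PySem.Int.mod x 2 = 1 then (1:Int) else 0 with hmdef
      have hup : (if PySem.Int.mod x 2 = 1 then c + 1 else c) = c + m := by
        rw [hmdef]; split <;> ring
      have hstep : subAInner (x :: rest) k c acc
          = (if c + m > k then acc
             else if c + m = k then subAInner rest k (c + m) (acc + 1)
             else subAInner rest k (c + m) acc) := by
        simp only [subAInner]
        rw [hup]
      rw [hstep, branch_eq rest k (c + m) acc ih, List.length_cons,
        Finset.sum_range_succ']
      have hterm : ∀ j ∈ Finset.range rest.length,
          (if c + ocI ((x :: rest).take (j + 1 + 1)) = k then (1:Int) else 0)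
            = (if (c + m) + ocI (rest.take (j + 1)) = k then (1:Int) else 0) := by
        intro j _
        rw [List.take_succ_cons, ocI_cons, ← hmdef, ← add_assoc]
      have hzero : (if c + ocI ((x :: rest).take (0 + 1)) = k then (1:Int) else 0)
          = (if c + m = k then (1:Int) else 0) := by
        rw [List.take_succ_cons, List.take_zero, ocI_cons, ← hmdef, ocI_nil, add_zero]
      rw [Finset.sum_congr rfl hterm, hzero]

-- per-start contribution, in prefix form
def rowA (arr : List Int) (k : Int) (a : ℕ) : Int :=
  ∑ b ∈ Finset.range (arr.length + 1),
    (if a < b ∧ pfx arr a + k = pfx arr b then (1:Int) else 0)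

-- per-end contribution
def rowB (arr : List Int) (k : Int) (b : ℕ) : Int :=
  ∑ a ∈ Finset.range b, (if pfx arr a + k = pfx arr b then (1:Int) else 0)

theorem outer_eq (k : Int) : ∀ (l : List Int) (acc : Int),
    subAOuter l k acc
      = acc + ∑ i ∈ Finset.range l.length,
          (∑ j ∈ Finset.range (l.drop i).length,
            (if ocI ((l.drop i).take (j + 1)) = k then (1:Int) else 0)) := by
  intro l
  induction l with
  | nil => intro acc; simp [subAOuter]
  | cons x rest ih =>
      intro acc
      have hR : (∑ i ∈ Finset.range (rest.length + 1),
            (∑ j ∈ Finset.range (((x :: rest).drop i).length),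
              (if ocI (((x :: rest).drop i).take (j + 1)) = k then (1:Int) else 0)))
          = (∑ i ∈ Finset.range rest.length,
              (∑ j ∈ Finset.range ((rest.drop i).length),
                (if ocI ((rest.drop i).take (j + 1)) = k then (1:Int) else 0)))
            + ∑ j ∈ Finset.range (rest.length + 1),
                (if ocI ((x :: rest).take (j + 1)) = k then (1:Int) else 0) := by
        rw [Finset.sum_range_succ']
        simp only [List.drop_succ_cons, List.drop_zero, List.length_cons]
        rfl
      rw [subAOuter, ih, inner_eq, List.length_cons, hR]
      simp only [zero_add]
      ring

theorem rowA_eq_inner (arr : List Int) (k : Int) (a : ℕ) (ha : a < arr.length) :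
    (∑ j ∈ Finset.range (arr.drop a).length,
      (if ocI ((arr.drop a).take (j + 1)) = k then (1:Int) else 0)) = rowA arr k a := by
  have hlen : (arr.drop a).length = arr.length - a := by simp
  have step1 :
      (∑ j ∈ Finset.range (arr.drop a).length,
        (if ocI ((arr.drop a).take (j + 1)) = k then (1:Int) else 0))
      = ∑ j ∈ Finset.range (arr.length + 1 - (a + 1)),
          (if a < (a + 1) + j ∧ pfx arr a + k = pfx arr ((a + 1) + j) then (1:Int) else 0) := by
    rw [hlen]
    apply Finset.sum_congr (by congr 1; omega)
    intro j hj
    have hp : pfx arr ((a + 1) + j) = pfx arr a + ocI ((arr.drop a).take (j + 1)) := by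
      have he : (a + 1) + j = a + (j + 1) := by omega
      rw [he, pfx_split]
    have hcond : (ocI ((arr.drop a).take (j + 1)) = k)
        ↔ (a < (a + 1) + j ∧ pfx arr a + k = pfx arr ((a + 1) + j)) := by
      constructor
      · intro h; exact ⟨by omega, by omega⟩
      · intro h; omega
    simp only [hcond]
  have hsplit : rowA arr k a
      = ∑ b ∈ Finset.Ico (a + 1) (arr.length + 1),
          (if a < b ∧ pfx arr a + k = pfx arr b then (1:Int) else 0) := by
    unfold rowA
    rw [Finset.range_eq_Ico,
      ← Finset.sum_Ico_consecutive _ (Nat.zero_le (a + 1)) (by omega : a + 1 ≤ arr.length + 1)]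
    have hz : (∑ b ∈ Finset.Ico 0 (a + 1),
        (if a < b ∧ pfx arr a + k = pfx arr b then (1:Int) else 0)) = 0 := by
      apply Finset.sum_eq_zero
      intro b hb
      simp only [Finset.mem_Ico] at hb
      have hnb : ¬ (a < b ∧ pfx arr a + k = pfx arr b) := by
        intro h; omega
      simp [hnb]
    rw [hz, zero_add]
  rw [step1, hsplit, Finset.sum_Ico_eq_sum_range]

theorem A_eq_pairs (arr : List Int) (k : Int) :
    subarrays arr k = ∑ a ∈ Finset.range (arr.length + 1), rowA arr k a := by
  by_cases h : arr = []
  · subst h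
    simp [subarrays, rowA]
  · rw [subarrays, if_neg h, outer_eq]
    rw [Finset.sum_range_succ]
    have hlast : rowA arr k arr.length = 0 := by
      apply Finset.sum_eq_zero
      intro b hb
      simp only [Finset.mem_range] at hb
      have hnb : ¬ (arr.length < b ∧ pfx arr arr.length + k = pfx arr b) := by
        intro hc; omega
      simp [hnb]
    rw [hlast]
    rw [Finset.sum_congr rfl (fun a ha => rowA_eq_inner arr k a (Finset.mem_range.mp ha))]
    ring

theorem B_loop_eq (arr : List Int) (k : Int) : ∀ (fuel m : ℕ) (d : PySem.Dict Int Int) (ans : Int),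
    arr.length - m = fuel → m ≤ arr.length →
    (∀ v : Int, d.getD v 0 = ∑ a ∈ Finset.range (m + 1), (if pfx arr a = v then (1:Int) else 0)) →
    subBLoop (arr.drop m) k (pfx arr m) d ans
      = ans + ∑ b ∈ Finset.Ico (m + 1) (arr.length + 1), rowB arr k b := by
  intro fuel
  induction fuel with
  | zero =>
      intro m d ans hf hm hd
      have hme : m = arr.length := by omega
      subst hme
      simp [subBLoop, List.drop_length]
  | succ fuel ih =>
      intro m d ans hf hm hd
      have hlt : m < arr.length := by omega
      have hdrop : arr.drop m = arr[m] :: arr.drop (m + 1) := List.drop_eq_getElem_cons hlt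
      rw [hdrop]
      simp only [subBLoop]
      rw [← pfx_succ arr m arr[m] (arr.drop (m+1)) hdrop]
      have hans : d.getD (pfx arr (m+1) - k) 0 = rowB arr k (m+1) := by
        rw [hd]
        unfold rowB
        apply Finset.sum_congr rfl
        intro a _
        have hiff : (pfx arr a = pfx arr (m+1) - k) ↔ (pfx arr a + k = pfx arr (m+1)) := by omega
        simp only [hiff]
      have hd' : ∀ v : Int,
          (d.insert (pfx arr (m+1)) (d.getD (pfx arr (m+1)) 0 + 1)).getD v 0
            = ∑ a ∈ Finset.range (m + 1 + 1), (if pfx arr a = v then (1:Int) else 0) := by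
        intro v
        rw [PySem.Dict.getD_insert, Finset.sum_range_succ]
        by_cases hv : v = pfx arr (m+1)
        · rw [if_pos hv, hd, hv]; simp
        · rw [if_neg hv, hd]
          have hne : ¬ (pfx arr (m+1) = v) := fun h => hv h.symm
          simp [hne]
      have ihm := ih (m+1) (d.insert (pfx arr (m+1)) (d.getD (pfx arr (m+1)) 0 + 1))
        (ans + d.getD (pfx arr (m+1) - k) 0) (by omega) (by omega) hd'
      rw [ihm, hans]
      rw [Finset.sum_eq_sum_Ico_succ_bot (by omega : m + 1 < arr.length + 1)]
      ring

theorem B_eq_pairs (arr : List Int) (k : Int) :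
    subarrays_alt arr k = ∑ b ∈ Finset.range (arr.length + 1), rowB arr k b := by
  by_cases h : arr = []
  · subst h
    simp [subarrays_alt, rowB]
  · rw [subarrays_alt, if_neg h]
    have hd0 : ∀ v : Int,
        (PySem.Dict.insert (PySem.Dict.empty) 0 1 : PySem.Dict Int Int).getD v 0
          = ∑ a ∈ Finset.range (0 + 1), (if pfx arr a = v then (1:Int) else 0) := by
      intro v
      rw [PySem.Dict.getD_insert, Finset.sum_range_one, pfx_zero]
      by_cases hv : v = 0
      · rw [if_pos hv, if_pos hv.symm]
      · rw [if_neg hv, if_neg (fun h' => hv h'.symm), PySem.Dict.getD_empty]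
    have hmain := B_loop_eq arr k arr.length 0 (PySem.Dict.insert (PySem.Dict.empty) 0 1) 0
      (by omega) (by omega) hd0
    rw [List.drop_zero, pfx_zero] at hmain
    rw [hmain]
    rw [Finset.range_eq_Ico, Finset.sum_eq_sum_Ico_succ_bot (by omega : 0 < arr.length + 1)]
    have h0 : rowB arr k 0 = 0 := by simp [rowB]
    rw [h0]

theorem pairs_comm (arr : List Int) (k : Int) :
    (∑ a ∈ Finset.range (arr.length + 1), rowA arr k a)
      = ∑ b ∈ Finset.range (arr.length + 1), rowB arr k b := by
  unfold rowA
  rw [Finset.sum_comm]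
  apply Finset.sum_congr rfl
  intro b hb
  simp only [Finset.mem_range] at hb
  unfold rowB
  rw [Finset.range_eq_Ico,
    ← Finset.sum_Ico_consecutive _ (Nat.zero_le b) (by omega : b ≤ arr.length + 1)]
  have h2 : (∑ a ∈ Finset.Ico b (arr.length + 1),
      (if a < b ∧ pfx arr a + k = pfx arr b then (1:Int) else 0)) = 0 := by
    apply Finset.sum_eq_zero
    intro a ha
    simp only [Finset.mem_Ico] at ha
    have hna : ¬ (a < b ∧ pfx arr a + k = pfx arr b) := by intro h; omega
    simp [hna]
  rw [h2]
  have h1 : (∑ a ∈ Finset.Ico 0 b,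
      (if a < b ∧ pfx arr a + k = pfx arr b then (1:Int) else 0))
      = ∑ a ∈ Finset.Ico 0 b, (if pfx arr a + k = pfx arr b then (1:Int) else 0) := by
    apply Finset.sum_congr rfl
    intro a ha
    simp only [Finset.mem_Ico] at ha
    have hiff : (a < b ∧ pfx arr a + k = pfx arr b) ↔ (pfx arr a + k = pfx arr b) := by
      constructor
      · exact fun h => h.2
      · exact fun h => ⟨by omega, h⟩
    simp only [hiff]
  rw [h1, ← Finset.range_eq_Ico]
  ring

-- ===== VERDICT (by name: the statement is the Claim_ definition above) =====
theorem subarrays_spec : Claim_equal_subarrays := by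
  intro arr k _
  unfold Spec_subarrays
  rw [A_eq_pairs, pairs_comm, B_eq_pairs]
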